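-- pv_equiv track=rewrite | github.com/tekteku/scraper | remax_playwright_integration.py | handle_hash_pagination
-- ===== SOURCE A (Python) =====
-- def handle_hash_pagination(current_url, page_number):
--     """
--     Handle Remax.com.tn hash-based URL pagination
--
--     Args:
--         current_url (str): The current URL
--         page_number (int): The desired page number to navigate to
--
--     Returns:
--         str: The URL with updated hash fragment for the requested page
--     """
--     # If URL already has a hash, parse it
--     if "#" in current_url:
--         base_url, hash_part = current_url.split('#', 1)
--
--         # If hash already has page parameter, update it
--         if "page=" in hash_part:
--             # Replace the current page with the new page
--             parts = []
--             for param in hash_part.split('&'):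
--                 if param.startswith("page="):
--                     parts.append(f"page={page_number}")
--                 else:
--                     parts.append(param)
--             new_hash = '&'.join(parts)
--             return f"{base_url}#{new_hash}"
--         else:
--             # Add page parameter to existing hash
--             return f"{current_url}&page={page_number}"
--     else:
--         # Create a new hash with default parameters based on observed URL patterns
--         return f"{current_url}#mode=gallery&tt=261&cur=TND&sb=MostRecent&page={page_number}&sc=1048"
-- ===== SOURCE B (Python) =====
-- def handle_hash_pagination(current_url, page_number):
--     # Single left-to-right character scan of the hash instead of split/loop/rejoin.
--     if '#' not in current_url:
--         return f"{current_url}#mode=gallery&tt=261&cur=TND&sb=MostRecent&page={page_number}&sc=1048"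
--     base_url, _sep, hash_part = current_url.partition('#')
--     if 'page=' not in hash_part:
--         return f"{current_url}&page={page_number}"
--     res = []
--     i, n, boundary = 0, len(hash_part), True
--     while i < n:
--         if boundary and hash_part.startswith('page=', i):
--             res.append(f'page={page_number}')
--             i += 5
--             while i < n and hash_part[i] != '&':
--                 i += 1
--             boundary = False
--         else:
--             c = hash_part[i]
--             res.append(c)
--             boundary = c == '&'
--             i += 1
--     return f"{base_url}#{''.join(res)}"
-- ===== Notes on version B (the rewrite author's own statement) =====
-- stated objective: alternative
-- what changed: A splits the hash on '&', rewrites each param in a loop and rejoins; B makes a single left-to-right character scan of the hash with a boundary flag (and uses partition instead of split('#',1)), never materialising a param list.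
import Mathlib
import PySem

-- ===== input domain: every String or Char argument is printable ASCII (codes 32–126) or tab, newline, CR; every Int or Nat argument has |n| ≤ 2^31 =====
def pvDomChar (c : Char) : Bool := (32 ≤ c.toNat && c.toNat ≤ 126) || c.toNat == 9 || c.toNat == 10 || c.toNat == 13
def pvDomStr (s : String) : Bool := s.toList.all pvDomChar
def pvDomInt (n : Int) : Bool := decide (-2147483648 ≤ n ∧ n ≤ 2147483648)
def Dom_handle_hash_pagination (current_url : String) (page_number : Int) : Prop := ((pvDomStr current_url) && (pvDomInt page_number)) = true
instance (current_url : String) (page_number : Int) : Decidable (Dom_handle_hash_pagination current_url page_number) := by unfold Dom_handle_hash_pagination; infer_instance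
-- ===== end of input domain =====

-- B replaces A's split('&')/loop/rejoin of the hash by a single left-to-right character
-- scan with a boundary flag (objective: alternative — no param list is materialised).

-- ===== PORT A =====
-- f-strings are ported as list-char concatenation; split/join/in/startswith via PySem.Chars.
def handle_hash_pagination (current_url : String) (page_number : Int) : String :=
  let cs := current_url.toList
  if PySem.Chars.isIn "#".toList cs then
    match PySem.Chars.splitOnMax cs "#".toList 1 with
    | [base_url, hash_part] =>
      if PySem.Chars.isIn "page=".toList hash_part then
        let parts := (PySem.Chars.splitOn hash_part "&".toList).foldl
          (fun acc param =>
            acc ++ [if PySem.Chars.startswith param "page=".toList then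
                      "page=".toList ++ PySem.Int.toChars page_number
                    else param]) []
        String.ofList (base_url ++ '#' :: PySem.Chars.join "&".toList parts)
      else
        String.ofList (cs ++ "&page=".toList ++ PySem.Int.toChars page_number)
    | _ => ""  -- unreachable: split('#', 1) yields exactly two pieces when '#' is present
  else
    String.ofList (cs ++ "#mode=gallery&tt=261&cur=TND&sb=MostRecent&page=".toList
                  ++ PySem.Int.toChars page_number ++ "&sc=1048".toList)

-- ===== PORT B =====
-- B's while-loop over hash_part (index i, boundary flag) as structural recursion on the
-- remaining suffix; the inner value-skipping while-loop is dropWhile, append/join is ++.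
def pvScan (page_number : Int) : List Char → Bool → List Char
  | [], _ => []
  | c :: rest, boundary =>
    if h : boundary && "page=".toList.isPrefixOf (c :: rest) then
      "page=".toList ++ PySem.Int.toChars page_number
        ++ pvScan page_number (((c :: rest).drop 5).dropWhile (· ≠ '&')) false
    else
      c :: pvScan page_number rest (c == '&')
  termination_by l _ => l.length
  decreasing_by
  · have hpre := List.isPrefixOf_iff_prefix.mp (Bool.and_eq_true_iff.mp h).2
    have h5 := hpre.length_le
    have h6 := List.length_dropWhile_le (fun x => decide (x ≠ '&')) ((c :: rest).drop 5)
    simp at h5 h6 ⊢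
    omega
  · simp

def handle_hash_pagination_alt (current_url : String) (page_number : Int) : String :=
  let cs := current_url.toList
  if !(PySem.Chars.isIn "#".toList cs) then
    String.ofList (cs ++ "#mode=gallery&tt=261&cur=TND&sb=MostRecent&page=".toList
                  ++ PySem.Int.toChars page_number ++ "&sc=1048".toList)
  else
    -- current_url.partition('#')  (find the first '#', cut around it)
    let i := (PySem.Chars.find cs "#".toList).toNat
    let base_url := cs.take i
    let hash_part := cs.drop (i + 1)
    if !(PySem.Chars.isIn "page=".toList hash_part) then
      String.ofList (cs ++ "&page=".toList ++ PySem.Int.toChars page_number)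
    else
      String.ofList (base_url ++ '#' :: pvScan page_number hash_part true)

-- ===== PRECONDITION & SPEC =====
def Spec_handle_hash_pagination (current_url : String) (page_number : Int) (out : String) : Prop := out = handle_hash_pagination_alt current_url page_number
instance (current_url : String) (page_number : Int) (out : String) : Decidable (Spec_handle_hash_pagination current_url page_number out) := by unfold Spec_handle_hash_pagination; infer_instance

-- ===== CLAIM (what is proved, stated in full; the proofs are below) =====
def Claim_equal_handle_hash_pagination : Prop := ∀ (current_url : String) (page_number : Int), Dom_handle_hash_pagination current_url page_number → Spec_handle_hash_pagination current_url page_number (handle_hash_pagination current_url page_number)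

-- ===== LEMMAS AND PROOFS =====

-- clean recursive model of Python split on the single separator '&'
def pvSplitAmp : List Char → List (List Char)
  | [] => [[]]
  | c :: r =>
    if c = '&' then [] :: pvSplitAmp r
    else match pvSplitAmp r with
      | t :: ts => (c :: t) :: ts
      | [] => [[c]]

def pvPre (p : List Char) : List (List Char) → List (List Char)
  | t :: ts => (p ++ t) :: ts
  | [] => [p]

-- A's per-param rewrite, and its application gated by the boundary flag on the head
def pvUpd (n : Int) (p : List Char) : List Char :=
  if PySem.Chars.startswith p "page=".toList then "page=".toList ++ PySem.Int.toChars n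
  else p

def pvUpdList (n : Int) (b : Bool) : List (List Char) → List (List Char)
  | p :: ps => (if b then pvUpd n p else p) :: ps.map (pvUpd n)
  | [] => []

lemma pvSplitAmp_ne_nil (l : List Char) : pvSplitAmp l ≠ [] := by
  cases l with
  | nil => simp [pvSplitAmp]
  | cons c r =>
    simp only [pvSplitAmp]
    split
    · simp
    · split <;> simp

lemma pvPre_nil (xs : List (List Char)) (h : xs ≠ []) : pvPre [] xs = xs := by
  cases xs with
  | nil => exact absurd rfl h
  | cons t ts => simp [pvPre]

lemma pvUpdList_true (n : Int) (xs : List (List Char)) :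
    pvUpdList n true xs = xs.map (pvUpd n) := by
  cases xs <;> simp [pvUpdList]

lemma splitOn_go_amp (fuel : Nat) (l cur : List Char) (acc : List (List Char))
    (hf : l.length < fuel) :
    PySem.Chars.splitOn.go "&".toList fuel l cur acc
      = acc.reverse ++ pvPre cur.reverse (pvSplitAmp l) := by
  induction fuel generalizing l cur acc with
  | zero => omega
  | succ fuel ih =>
    cases l with
    | nil => simp [PySem.Chars.splitOn.go, pvSplitAmp, pvPre]
    | cons c r =>
      by_cases hc : c = '&'
      · subst hc
        have hpre : "&".toList.isPrefixOf ('&' :: r) = true := by simp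
        simp only [PySem.Chars.splitOn.go, hpre, if_pos]
        rw [show List.drop "&".toList.length ('&' :: r) = r from rfl]
        rw [ih r [] (cur.reverse :: acc) (by simpa using Nat.lt_of_succ_lt_succ hf)]
        simp only [List.reverse_nil]
        rw [pvPre_nil _ (pvSplitAmp_ne_nil r)]
        simp [pvSplitAmp, pvPre]
      · have hpre : "&".toList.isPrefixOf (c :: r) = false := by
          simp [List.isPrefixOf, Ne.symm hc]
        simp only [PySem.Chars.splitOn.go, hpre, Bool.false_eq_true, if_false]
        rw [ih r (c :: cur) acc (by simpa using Nat.lt_of_succ_lt_succ hf)]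
        simp only [pvSplitAmp, hc, if_false]
        rcases hs : pvSplitAmp r with _ | ⟨t, ts⟩
        · exact absurd hs (pvSplitAmp_ne_nil r)
        · simp [pvPre]

lemma splitOn_amp (l : List Char) :
    PySem.Chars.splitOn l "&".toList = pvSplitAmp l := by
  show PySem.Chars.splitOn.go _ _ _ _ _ = _
  rw [splitOn_go_amp (l.length + 1) l [] [] (by omega)]
  simp [pvPre_nil _ (pvSplitAmp_ne_nil l)]

-- Python split(sep, maxsplit) with maxsplit exhausted returns the rest as one piece
lemma splitOnMax_go_zero (sep : List Char) (fuel : Nat) (l cur : List Char)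
    (acc : List (List Char)) :
    PySem.Chars.splitOnMax.go sep fuel 0 l cur acc
      = acc.reverse ++ [cur.reverse ++ l] := by
  cases fuel with
  | zero => simp [PySem.Chars.splitOnMax.go]
  | succ fuel => cases l <;> simp [PySem.Chars.splitOnMax.go]

lemma splitOnMax_go_hash (fuel : Nat) (l cur : List Char) (acc : List (List Char))
    (hf : l.length < fuel) :
    PySem.Chars.splitOnMax.go "#".toList fuel 1 l cur acc
      = acc.reverse ++ [cur.reverse ++ l.takeWhile (· ≠ '#')]
          ++ (if '#' ∈ l then [(l.dropWhile (· ≠ '#')).tail] else []) := by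
  induction fuel generalizing l cur acc with
  | zero => omega
  | succ fuel ih =>
    cases l with
    | nil => simp [PySem.Chars.splitOnMax.go]
    | cons c r =>
      by_cases hc : c = '#'
      · subst hc
        have hpre : "#".toList.isPrefixOf ('#' :: r) = true := by simp
        simp only [PySem.Chars.splitOnMax.go, hpre, if_pos]
        norm_num
        rw [show List.drop "#".length ('#' :: r) = r from rfl]
        rw [splitOnMax_go_zero]
        simp
      · have hpre : "#".toList.isPrefixOf (c :: r) = false := by
          simp [List.isPrefixOf, Ne.symm hc]
        simp only [PySem.Chars.splitOnMax.go, hpre, Bool.false_eq_true, if_false]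
        norm_num
        rw [ih r (c :: cur) acc (by simpa using Nat.lt_of_succ_lt_succ hf)]
        have hcc : ¬ '#' = c := fun hh => hc hh.symm
        simp [hc, hcc]

lemma splitOnMax_hash (l : List Char) (h : '#' ∈ l) :
    PySem.Chars.splitOnMax l "#".toList 1
      = [l.takeWhile (· ≠ '#'), (l.dropWhile (· ≠ '#')).tail] := by
  show PySem.Chars.splitOnMax.go _ _ _ _ _ _ = _
  rw [show (1 : Int).toNat = 1 from rfl]
  rw [splitOnMax_go_hash (l.length + 1) l [] [] (by omega)]
  simp [h]

lemma dropWhile_head_false {p : Char → Bool} {l : List Char} {x : Char} {xs : List Char}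
    (h : l.dropWhile p = x :: xs) : p x = false := by
  induction l with
  | nil => simp at h
  | cons a t ih =>
    rw [List.dropWhile_cons] at h
    by_cases ha : p a = true
    · exact ih (by simpa [ha] using h)
    · rw [if_neg ha] at h
      injection h with h1 _
      subst h1
      simpa using ha

-- the '#' ∈ l view of isIn for a single-character needle
lemma isIn_hash_iff (l : List Char) : PySem.Chars.isIn "#".toList l = true ↔ '#' ∈ l := by
  rw [PySem.Chars.isIn_iff_infix]
  constructor
  · rintro ⟨s, t, rfl⟩; simp
  · intro hm
    rcases List.append_of_mem hm with ⟨s, t, rfl⟩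
    exact ⟨s, t, by simp⟩

-- cutting at the FIRST occurrence index is takeWhile / tail-of-dropWhile
lemma take_drop_of_first (l : List Char) : ∀ i : Nat,
    "#".toList <+: l.drop i → (∀ j < i, ¬ "#".toList <+: l.drop j) →
    l.take i = l.takeWhile (· ≠ '#')
    ∧ l.drop (i + 1) = (l.dropWhile (· ≠ '#')).tail := by
  induction l with
  | nil =>
    intro i hpre _
    rcases hpre with ⟨t, ht⟩
    simp at ht
  | cons c r ih =>
    intro i hpre hmin
    cases i with
    | zero =>
      simp only [List.drop_zero] at hpre
      have hc : c = '#' := by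
        rcases hpre with ⟨t, ht⟩
        cases ht; rfl
      simp [hc]
    | succ j =>
      have hc : ¬ c = '#' := by
        intro hc
        exact hmin 0 (Nat.succ_pos j) ⟨r, by simp [hc]⟩
      have hpre' : "#".toList <+: r.drop j := by simpa using hpre
      have hmin' : ∀ k < j, ¬ "#".toList <+: r.drop k := by
        intro k hk hp
        exact hmin (k + 1) (by omega) (by simpa using hp)
      obtain ⟨h1, h2⟩ := ih j hpre' hmin'
      constructor
      · simpa [List.takeWhile_cons, hc] using h1
      · simpa [List.dropWhile_cons, hc] using h2

-- Python's str.partition('#'): find points at the first '#'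
lemma find_hash_take_drop (l : List Char) (h : '#' ∈ l) :
    l.take (PySem.Chars.find l "#".toList).toNat = l.takeWhile (· ≠ '#')
    ∧ l.drop ((PySem.Chars.find l "#".toList).toNat + 1)
        = (l.dropWhile (· ≠ '#')).tail := by
  have hnn : 0 ≤ PySem.Chars.find l "#".toList := by
    rw [PySem.Chars.find_nonneg_iff]
    rcases List.append_of_mem h with ⟨s, t, rfl⟩
    exact ⟨s, t, by simp⟩
  obtain ⟨hpre, hmin⟩ := PySem.Chars.find_spec hnn
  exact take_drop_of_first l _ hpre hmin

-- join over '&'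
lemma join_amp_cons_cons (x y : List Char) (xs : List (List Char)) :
    PySem.Chars.join "&".toList (x :: y :: xs)
      = x ++ '&' :: PySem.Chars.join "&".toList (y :: xs) := by
  simp [PySem.Chars.join, List.intercalate, List.intersperse]

lemma join_amp_singleton (x : List Char) :
    PySem.Chars.join "&".toList [x] = x := by
  simp [PySem.Chars.join, List.intercalate]

-- head/tail view of pvSplitAmp
lemma pvSplitAmp_eq (l : List Char) :
    pvSplitAmp l = l.takeWhile (· ≠ '&')
      :: (match l.dropWhile (· ≠ '&') with
          | [] => []
          | _ :: r => pvSplitAmp r) := by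
  induction l with
  | nil => simp [pvSplitAmp]
  | cons c r ih =>
    by_cases hc : c = '&'
    · simp [pvSplitAmp, hc]
    · simp only [pvSplitAmp, hc, if_false, List.takeWhile_cons, List.dropWhile_cons]
      rw [ih]
      simp [hc]

lemma pvSplitAmp_of_dropWhile_nil (l : List Char)
    (h : l.dropWhile (· ≠ '&') = []) :
    pvSplitAmp l = [l.takeWhile (· ≠ '&')] := by
  rw [pvSplitAmp_eq, h]

lemma pvSplitAmp_of_dropWhile_cons (l : List Char) (d : Char) (r : List Char)
    (h : l.dropWhile (· ≠ '&') = d :: r) :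
    pvSplitAmp l = l.takeWhile (· ≠ '&') :: pvSplitAmp r := by
  rw [pvSplitAmp_eq, h]

-- the scanner computes exactly A's split/map/join (head's test gated by the flag)
set_option maxRecDepth 4096 in
lemma pvScan_eq_join (n : Int) : ∀ (k : Nat) (l : List Char), l.length ≤ k → ∀ (b : Bool),
    pvScan n l b = PySem.Chars.join "&".toList (pvUpdList n b (pvSplitAmp l)) := by
  intro k
  induction k with
  | zero =>
    intro l hl b
    have : l = [] := List.length_eq_zero_iff.mp (Nat.le_zero.mp hl)
    subst this
    simp [pvScan, pvSplitAmp, pvUpdList, pvUpd, PySem.Chars.startswith]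
  | succ k ih =>
    intro l hl b
    cases l with
    | nil =>
      simp [pvScan, pvSplitAmp, pvUpdList, pvUpd, PySem.Chars.startswith]
    | cons c rest =>
      by_cases hcond : (b && "page=".toList.isPrefixOf (c :: rest)) = true
      · -- page= at a boundary: emit the replacement and skip the old value
        obtain ⟨hb, hpg⟩ := Bool.and_eq_true_iff.mp hcond
        subst hb
        obtain ⟨t, hT⟩ := List.isPrefixOf_iff_prefix.mp hpg
        rw [pvScan, dif_pos hcond]
        have hnoamp : ∀ a ∈ "page=".toList, (fun x => decide (x ≠ '&')) a = true := by
          rw [show "page=".toList = ['p', 'a', 'g', 'e', '='] from rfl]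
          intro a ha
          fin_cases ha <;> rfl
        have htake : (c :: rest).takeWhile (· ≠ '&')
            = "page=".toList ++ t.takeWhile (· ≠ '&') := by
          rw [← hT]; exact List.takeWhile_append_of_pos hnoamp
        have hdropw : (c :: rest).dropWhile (· ≠ '&') = t.dropWhile (· ≠ '&') := by
          rw [← hT]; exact List.dropWhile_append_of_pos hnoamp
        have hdrop5 : (c :: rest).drop 5 = t := by
          rw [← hT]; rfl
        have hhead : pvUpd n ((c :: rest).takeWhile (· ≠ '&'))
            = "page=".toList ++ PySem.Int.toChars n := by
          rw [htake, pvUpd]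
          rw [if_pos (by simp [PySem.Chars.startswith])]
        rw [hdrop5]
        rcases hd : t.dropWhile (· ≠ '&') with _ | ⟨d, r⟩
        · rw [pvSplitAmp_of_dropWhile_nil _ (by rw [hdropw, hd])]
          rw [pvScan]
          simp only [pvUpdList, hhead, List.map_nil]
          rw [join_amp_singleton]
          simp
        · have hdamp : d = '&' := by
            have := dropWhile_head_false hd
            simpa using this
          subst hdamp
          rw [pvSplitAmp_of_dropWhile_cons _ '&' r (by rw [hdropw, hd])]
          rw [pvScan, dif_neg (by simp)]
          have hr : r.length ≤ k := by
            have h1 := List.length_dropWhile_le (fun x => decide (x ≠ '&')) t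
            rw [hd] at h1
            have hlen := congrArg List.length hT
            simp at h1 hlen hl
            omega
          rw [show (('&' : Char) == '&') = true from rfl]
          rw [ih r hr true, pvUpdList_true]
          rcases hs : pvSplitAmp r with _ | ⟨y, ys⟩
          · exact absurd hs (pvSplitAmp_ne_nil r)
          · simp only [pvUpdList, hhead, List.map_cons]
            rw [join_amp_cons_cons]
            simp
      · -- ordinary character: copy it, boundary follows '&'
        rw [pvScan, dif_neg hcond]
        have hrest : rest.length ≤ k := by simpa using hl
        by_cases hc : c = '&'
        · subst hc
          have hsplit : pvSplitAmp ('&' :: rest) = [] :: pvSplitAmp rest := by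
            simp [pvSplitAmp]
          rw [hsplit]
          have hupd0 : pvUpd n [] = [] := by
            rw [pvUpd, if_neg (by simp [PySem.Chars.startswith])]
          rw [show (('&' : Char) == '&') = true from rfl]
          rw [ih rest hrest true, pvUpdList_true]
          rcases hs : pvSplitAmp rest with _ | ⟨y, ys⟩
          · exact absurd hs (pvSplitAmp_ne_nil rest)
          · simp only [pvUpdList, hupd0, List.map_cons]
            rw [join_amp_cons_cons]
            simp
        · have hcb : (c == '&') = false := by simpa using hc
          rw [hcb, ih rest hrest false]
          have hdc : (c :: rest).dropWhile (· ≠ '&') = rest.dropWhile (· ≠ '&') := by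
            simp [hc]
          have htc : (c :: rest).takeWhile (· ≠ '&') = c :: rest.takeWhile (· ≠ '&') := by
            simp [hc]
          have hhead2 : (if b = true then pvUpd n (c :: rest.takeWhile (· ≠ '&'))
              else c :: rest.takeWhile (· ≠ '&')) = c :: rest.takeWhile (· ≠ '&') := by
            cases b
            · rfl
            · rw [if_pos rfl, pvUpd, if_neg]
              intro hsw
              apply hcond
              simp only [Bool.true_and]
              have hpfx : "page=".toList <+: c :: rest.takeWhile (· ≠ '&') := by
                simpa [PySem.Chars.startswith, List.isPrefixOf_iff_prefix] using hsw
              have : "page=".toList <+: c :: rest := by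
                refine hpfx.trans ?_
                have := List.takeWhile_prefix (l := rest) (p := (· ≠ '&'))
                exact (List.cons_prefix_cons).mpr ⟨rfl, this⟩
              simpa [List.isPrefixOf_iff_prefix] using this
          rcases hdw : rest.dropWhile (· ≠ '&') with _ | ⟨d, r2⟩
          · rw [pvSplitAmp_of_dropWhile_nil (c :: rest) (by rw [hdc, hdw]),
              pvSplitAmp_of_dropWhile_nil rest hdw, htc]
            simp only [pvUpdList, List.map_nil]
            rw [hhead2, join_amp_singleton, join_amp_singleton]
            simp
          · rw [pvSplitAmp_of_dropWhile_cons (c :: rest) d r2 (by rw [hdc, hdw]),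
              pvSplitAmp_of_dropWhile_cons rest d r2 hdw, htc]
            rcases hs : pvSplitAmp r2 with _ | ⟨y, ys⟩
            · exact absurd hs (pvSplitAmp_ne_nil r2)
            · simp only [pvUpdList, List.map_cons]
              rw [hhead2, join_amp_cons_cons, join_amp_cons_cons]
              simp

-- ===== VERDICT (by name: the statement is the Claim_ definition above) =====
theorem handle_hash_pagination_spec : Claim_equal_handle_hash_pagination := by
  intro url n _dom
  unfold Spec_handle_hash_pagination
  unfold handle_hash_pagination handle_hash_pagination_alt
  by_cases hin : PySem.Chars.isIn "#".toList url.toList = true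
  · have hmem : '#' ∈ url.toList := (isIn_hash_iff _).mp hin
    obtain ⟨htake, hdrop⟩ := find_hash_take_drop url.toList hmem
    simp only [hin, Bool.not_true, Bool.false_eq_true, if_false, if_true]
    rw [splitOnMax_hash url.toList hmem]
    rw [htake, hdrop]
    by_cases hpg : PySem.Chars.isIn "page=".toList
        ((url.toList.dropWhile (· ≠ '#')).tail) = true
    · simp only [hpg, Bool.not_true, Bool.false_eq_true, if_false, if_true]
      rw [PySem.List.foldl_append_singleton_eq_map, splitOn_amp]
      rw [pvScan_eq_join n (((url.toList.dropWhile (· ≠ '#')).tail).length) _ le_rfl true,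
        pvUpdList_true]
      rw [show pvUpd n = fun p =>
        if PySem.Chars.startswith p "page=".toList = true
        then "page=".toList ++ PySem.Int.toChars n else p from rfl]
      simp
    · simp at hpg
      simp [hpg]
  · simp at hin
    simp [hin]
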